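-- pv_equiv track=rewrite | github.com/AkshataUV/LedgerAI | parser_backend/services/pdf_service.py | _remove_footer_lines
-- ===== SOURCE A (Python) =====
-- from typing import List, Optional, Dict, Tuple
--
-- FOOTER_PHRASES = [
--     'this is a computer generated',
--     'does not require signature',
--     'need not normally be signed',
--     'contents of this statement will be',
--     'no error is reported within',
--     'treated that the entries',
--     'please do not share your atm',
--     'bank never asks for',
--     'if you receive any alerts',
--     'registered office address',
--     'hdfcbanklimited',
--     'closingbalanceincludes',
--     'contentsofthisstatement',
--     'stateaccountbranchgstn',
--     'hdfcbankgstinnumber',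
--     'stateaccountbranch',
--     'cin:',
--     'customer care',
--     'toll free',
--     'end of statement',
--     '*** end of',
--     'powered by',
--     'beware of cyber',
--     'nevershare',
--     'never share your',
--     'scan for',
--     'disclaimer',
--     'deposit insurance',
--     'yes bank gstin',
--     'through sms',
--     'w.e.f',
--     'please refer to the notice',
--     'please visit',
-- ]
--
-- def _remove_footer_lines(lines: List[str]) -> List[str]:
--     out = []
--     for line in lines:
--         ll = line.lower().strip()
--         if any(phrase in ll for phrase in FOOTER_PHRASES):
--             continue
--         out.append(line)
--     return out
-- ===== SOURCE B (Python) =====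
-- from typing import List, Optional, Dict, Tuple
--
-- FOOTER_PHRASES = [
--     'this is a computer generated',
--     'does not require signature',
--     'need not normally be signed',
--     'contents of this statement will be',
--     'no error is reported within',
--     'treated that the entries',
--     'please do not share your atm',
--     'bank never asks for',
--     'if you receive any alerts',
--     'registered office address',
--     'hdfcbanklimited',
--     'closingbalanceincludes',
--     'contentsofthisstatement',
--     'stateaccountbranchgstn',
--     'hdfcbankgstinnumber',
--     'stateaccountbranch',
--     'cin:',
--     'customer care',
--     'toll free',
--     'end of statement',
--     '*** end of',
--     'powered by',
--     'beware of cyber',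
--     'nevershare',
--     'never share your',
--     'scan for',
--     'disclaimer',
--     'deposit insurance',
--     'yes bank gstin',
--     'through sms',
--     'w.e.f',
--     'please refer to the notice',
--     'please visit',
-- ]
--
-- # Index the phrases once by their first character: at each position of the line
-- # only the few phrases that can start there are tried with startswith.
-- _BY_FIRST = {}
-- for _p in FOOTER_PHRASES:
--     _BY_FIRST.setdefault(_p[0], []).append(_p)
--
--
-- def _is_footer(ll):
--     for i in range(len(ll)):
--         for p in _BY_FIRST.get(ll[i], ()):
--             if ll.startswith(p, i):
--                 return True
--     return False
--
--
-- def _remove_footer_lines(lines: List[str]) -> List[str]: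
--     out = []
--     for line in lines:
--         if not _is_footer(line.lower().strip()):
--             out.append(line)
--     return out
-- ===== Notes on version B (the rewrite author's own statement) =====
-- stated objective: alternative
-- what changed: Instead of testing all 33 phrases with a separate 'in' substring scan per phrase, B builds a dict indexing the phrases by first character once, then sweeps each lowered/stripped line left to right, at each position testing only the few candidate phrases with startswith.
import Mathlib
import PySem

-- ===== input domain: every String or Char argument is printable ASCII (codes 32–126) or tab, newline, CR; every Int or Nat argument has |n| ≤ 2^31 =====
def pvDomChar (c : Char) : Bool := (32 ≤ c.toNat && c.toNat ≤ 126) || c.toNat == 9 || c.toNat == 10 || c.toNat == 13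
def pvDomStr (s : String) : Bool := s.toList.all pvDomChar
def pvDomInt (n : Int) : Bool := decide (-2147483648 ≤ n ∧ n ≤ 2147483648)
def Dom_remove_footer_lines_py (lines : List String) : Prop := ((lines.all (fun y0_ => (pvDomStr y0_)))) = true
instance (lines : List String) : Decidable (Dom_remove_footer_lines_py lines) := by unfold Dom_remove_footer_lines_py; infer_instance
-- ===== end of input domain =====

-- B indexes the phrases once by first character and sweeps each line position-by-position
-- (startswith against the few candidate phrases) instead of running 33 separate substring scans.

-- ===== PORT A =====
def footerPhrases : List String := [
  "this is a computer generated",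
  "does not require signature",
  "need not normally be signed",
  "contents of this statement will be",
  "no error is reported within",
  "treated that the entries",
  "please do not share your atm",
  "bank never asks for",
  "if you receive any alerts",
  "registered office address",
  "hdfcbanklimited",
  "closingbalanceincludes",
  "contentsofthisstatement",
  "stateaccountbranchgstn",
  "hdfcbankgstinnumber",
  "stateaccountbranch",
  "cin:",
  "customer care",
  "toll free",
  "end of statement",
  "*** end of",
  "powered by",
  "beware of cyber",
  "nevershare",
  "never share your",
  "scan for",
  "disclaimer",
  "deposit insurance",
  "yes bank gstin",
  "through sms",
  "w.e.f",
  "please refer to the notice",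
  "please visit"]

def remove_footer_lines_py (lines : List String) : List String :=
  lines.foldl (fun out line =>
    let ll := PySem.Str.strip (PySem.Str.lower line)
    if footerPhrases.any (fun phrase => PySem.Str.isIn phrase ll) then out
    else out ++ [line]) []

-- ===== PORT B =====
-- _BY_FIRST: phrases grouped by first character (every phrase is nonempty, so
-- p[0] is ported as headD; the in-place list append is insert of getD ++ [p]).
def byFirst : PySem.Dict Char (List (List Char)) :=
  (footerPhrases.map String.toList).foldl
    (fun d p => d.insert (p.headD ' ') (d.getD (p.headD ' ') [] ++ [p]))
    PySem.Dict.empty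

-- _is_footer: scan positions left to right; at each position try only the
-- phrases whose first character matches (ll.startswith(p, i) = startswith on the suffix).
def isFooterAux : List Char → Bool
  | [] => false
  | c :: rest =>
    if (byFirst.getD c []).any (fun p => PySem.Chars.startswith (c :: rest) p) then true
    else isFooterAux rest

def remove_footer_lines_py_alt (lines : List String) : List String :=
  lines.foldl (fun out line =>
    if isFooterAux (PySem.Str.strip (PySem.Str.lower line)).toList then out
    else out ++ [line]) []

-- ===== PRECONDITION & SPEC =====
def Spec_remove_footer_lines_py (lines : List String) (out : List String) : Prop := out = remove_footer_lines_py_alt lines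
instance (lines : List String) (out : List String) : Decidable (Spec_remove_footer_lines_py lines out) := by unfold Spec_remove_footer_lines_py; infer_instance

-- ===== CLAIM (what is proved, stated in full; the proofs are below) =====
def Claim_equal_remove_footer_lines_py : Prop := ∀ (lines : List String), Dom_remove_footer_lines_py lines → Spec_remove_footer_lines_py lines (remove_footer_lines_py lines)

-- ===== LEMMAS AND PROOFS =====

-- the grouping fold characterised: looking up c returns exactly the phrases with first char c, in order
theorem getD_groupFold (l : List (List Char)) (d : PySem.Dict Char (List (List Char))) (c : Char) :
    ((l.foldl (fun d p => d.insert (p.headD ' ') (d.getD (p.headD ' ') [] ++ [p])) d).getD c [])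
      = d.getD c [] ++ l.filter (fun p => p.headD ' ' == c) := by
  induction l generalizing d with
  | nil => simp
  | cons p t ih =>
    simp only [List.foldl_cons, List.filter_cons, ih, PySem.Dict.getD_insert]
    by_cases h : p.headD ' ' = c
    · rw [h]; simp
    · rw [if_neg (fun hc => h hc.symm)]
      simp only [List.headD_eq_head?_getD] at h
      simp [h]

theorem byFirst_getD (c : Char) :
    byFirst.getD c [] = (footerPhrases.map String.toList).filter (fun p => p.headD ' ' == c) := by
  rw [byFirst, getD_groupFold]
  simp [PySem.Dict.getD_empty]

theorem footerPhrases_ne_nil : ∀ p ∈ footerPhrases.map String.toList, p ≠ [] := by decide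

theorem headD_of_prefix {p : List Char} {c : Char} {rest : List Char}
    (hne : p ≠ []) (h : p <+: c :: rest) : p.headD ' ' = c := by
  cases p with
  | nil => exact absurd rfl hne
  | cons a q => exact (List.cons_prefix_cons.mp h).1

theorem isFooterAux_eq_any (cs : List Char) :
    isFooterAux cs = (footerPhrases.map String.toList).any (fun p => PySem.Chars.isIn p cs) := by
  induction cs with
  | nil =>
    rw [isFooterAux]
    symm
    simp only [List.any_eq_false]
    intro p hp hb
    rcases (PySem.Chars.exists_prefix_drop_iff_isIn p []).mpr hb with ⟨j, hj⟩
    simp at hj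
    exact absurd hj (footerPhrases_ne_nil p hp)
  | cons c rest ih =>
    rw [isFooterAux]
    rw [Bool.eq_iff_iff]
    constructor
    · intro h
      split_ifs at h with hc
      · rcases List.any_eq_true.mp hc with ⟨p, hpmem, hpst⟩
        rw [byFirst_getD] at hpmem
        have hp := (List.mem_filter.mp hpmem).1
        have hpre := (PySem.Chars.startswith_iff _ _).mp hpst
        refine List.any_eq_true.mpr ⟨p, hp, ?_⟩
        exact (PySem.Chars.exists_prefix_drop_iff_isIn p (c :: rest)).mp ⟨0, by simpa using hpre⟩
      · rcases List.any_eq_true.mp (ih ▸ h) with ⟨p, hp, hin⟩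
        rcases (PySem.Chars.exists_prefix_drop_iff_isIn p rest).mpr hin with ⟨j, hj⟩
        refine List.any_eq_true.mpr ⟨p, hp, ?_⟩
        exact (PySem.Chars.exists_prefix_drop_iff_isIn p (c :: rest)).mp ⟨j + 1, by simpa using hj⟩
    · intro h
      rcases List.any_eq_true.mp h with ⟨p, hp, hin⟩
      rcases (PySem.Chars.exists_prefix_drop_iff_isIn p (c :: rest)).mpr hin with ⟨j, hj⟩
      cases j with
      | zero =>
        have hpre : p <+: c :: rest := by simpa using hj
        have hhead := headD_of_prefix (footerPhrases_ne_nil p hp) hpre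
        have : (byFirst.getD c []).any (fun q => PySem.Chars.startswith (c :: rest) q) = true := by
          refine List.any_eq_true.mpr ⟨p, ?_, (PySem.Chars.startswith_iff _ _).mpr hpre⟩
          rw [byFirst_getD]
          exact List.mem_filter.mpr ⟨hp, by simp only [beq_iff_eq]; exact hhead⟩
        simp [this]
      | succ j =>
        have hin' : PySem.Chars.isIn p rest = true :=
          (PySem.Chars.exists_prefix_drop_iff_isIn p rest).mp ⟨j, by simpa using hj⟩
        have : isFooterAux rest = true := by
          rw [ih]; exact List.any_eq_true.mpr ⟨p, hp, hin'⟩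
        split_ifs <;> simp [this]

theorem cond_eq (line : String) :
    footerPhrases.any (fun phrase => PySem.Str.isIn phrase (PySem.Str.strip (PySem.Str.lower line)))
      = isFooterAux (PySem.Str.strip (PySem.Str.lower line)).toList := by
  rw [isFooterAux_eq_any, List.any_map]
  simp only [PySem.Str.isIn_eq, Function.comp_def]

-- ===== VERDICT (by name: the statement is the Claim_ definition above) =====
theorem remove_footer_lines_py_spec : Claim_equal_remove_footer_lines_py := by
  intro lines _
  unfold Spec_remove_footer_lines_py remove_footer_lines_py remove_footer_lines_py_alt
  apply PySem.List.foldl_congr_mem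
  intro acc line _
  simp only [cond_eq line]
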